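-- pv_equiv track=rewrite | github.com/oliverfrost1/chess-video-move-detection | src/chess_notation.py | format_game_notation
-- ===== SOURCE A (Python) =====
-- from typing import Dict, List
--
-- def format_game_notation(moves: List[str], first_move_black: bool) -> str:
--     """Format the full game notation."""
--     if not moves:
--         return ""
--
--     if first_move_black:
--         notation = f"1... {moves[0]}"
--         move_number = 2
--         idx = 1
--     else:
--         notation = f"1. {moves[0]}"
--         idx = 1
--         if idx < len(moves):
--             notation += f" {moves[idx]}"
--             idx += 1
--         move_number = 2
--
--     while idx < len(moves):
--         notation += f" {move_number}."
--         notation += f" {moves[idx]}"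
--         idx += 1
--         if idx < len(moves):
--             notation += f" {moves[idx]}"
--             idx += 1
--         move_number += 1
--
--     return notation
-- ===== SOURCE B (Python) =====
-- from typing import List
--
--
-- def format_game_notation(moves: List[str], first_move_black: bool) -> str:
--     """Format the full game notation (index-arithmetic, token-list version)."""
--     parts = []
--     for i, mv in enumerate(moves):
--         if first_move_black:
--             if i == 0:
--                 parts.append(f"1... {mv}")
--             elif i % 2 == 1:
--                 parts.append(f"{i // 2 + 2}. {mv}")
--             else:
--                 parts.append(mv)
--         else:
--             if i % 2 == 0:
--                 parts.append(f"{i // 2 + 1}. {mv}")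
--             else:
--                 parts.append(mv)
--     return " ".join(parts)
-- ===== Notes on version B (the rewrite author's own statement) =====
-- stated objective: faster
-- what changed: Replaces A's while loop with idx cursor and move_number counter (consuming one or two moves per iteration with in-loop bounds checks and repeated string += concatenation) by a single enumerate pass that derives each move number from the index by parity arithmetic, building a token list joined once with ' '.join.
import Mathlib
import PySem

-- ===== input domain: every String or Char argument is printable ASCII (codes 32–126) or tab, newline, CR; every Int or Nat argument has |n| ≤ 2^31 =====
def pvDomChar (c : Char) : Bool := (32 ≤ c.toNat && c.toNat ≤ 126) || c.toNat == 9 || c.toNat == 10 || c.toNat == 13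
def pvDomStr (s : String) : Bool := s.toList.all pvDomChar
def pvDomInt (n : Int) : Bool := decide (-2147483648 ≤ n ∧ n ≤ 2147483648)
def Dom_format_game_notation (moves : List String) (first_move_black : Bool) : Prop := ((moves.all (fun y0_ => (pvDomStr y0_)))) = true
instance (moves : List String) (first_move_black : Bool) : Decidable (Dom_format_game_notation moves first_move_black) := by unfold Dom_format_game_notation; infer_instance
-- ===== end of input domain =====

-- B replaces A's idx/move_number counter loop (repeated string += concatenation) by a single
-- enumerate pass deriving move numbers from the index, joining a token list once; measured faster.


-- ===== PORT A =====
-- A's while loop: iterates over the suffix of `moves` still to process (the Python's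
-- `idx` cursor becomes the remaining list), carrying the `move_number` counter and the
-- accumulated `notation` string exactly as A does.
def fgnLoop (rest : List String) (move_number : Int) (nota : String) : String :=
  match rest with
  | [] => nota
  | m :: rest' =>
    let nota := nota ++ " " ++ PySem.Int.toStr move_number ++ "." ++ " " ++ m
    match rest' with
    | [] => nota
    | m2 :: rest'' => fgnLoop rest'' (move_number + 1) (nota ++ " " ++ m2)

def format_game_notation (moves : List String) (first_move_black : Bool) : String :=
  match moves with
  | [] => ""
  | m0 :: rest =>
    if first_move_black then
      fgnLoop rest 2 ("1... " ++ m0)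
    else
      match rest with
      | [] => fgnLoop [] 2 ("1. " ++ m0)
      | m1 :: rest' => fgnLoop rest' 2 ("1. " ++ m0 ++ " " ++ m1)

-- ===== PORT B =====
def fgnToken (first_move_black : Bool) (i : Int) (mv : String) : String :=
  if first_move_black then
    if i = 0 then "1... " ++ mv
    else if PySem.Int.mod i 2 = 1 then PySem.Int.toStr (PySem.Int.floordiv i 2 + 2) ++ ". " ++ mv
    else mv
  else
    if PySem.Int.mod i 2 = 0 then PySem.Int.toStr (PySem.Int.floordiv i 2 + 1) ++ ". " ++ mv
    else mv

def format_game_notation_alt (moves : List String) (first_move_black : Bool) : String :=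
  PySem.Str.join " " ((PySem.List.enumerate moves 0).map (fun p => fgnToken first_move_black p.1 p.2))

-- ===== PRECONDITION & SPEC =====
def Spec_format_game_notation (moves : List String) (first_move_black : Bool) (out : String) : Prop := out = format_game_notation_alt moves first_move_black
instance (moves : List String) (first_move_black : Bool) (out : String) : Decidable (Spec_format_game_notation moves first_move_black out) := by unfold Spec_format_game_notation; infer_instance

-- ===== CLAIM (what is proved, stated in full; the proofs are below) =====
def Claim_equal_format_game_notation : Prop := ∀ (moves : List String) (first_move_black : Bool), Dom_format_game_notation moves first_move_black → Spec_format_game_notation moves first_move_black (format_game_notation moves first_move_black)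

-- ===== LEMMAS AND PROOFS =====

-- B's token list for the suffix of moves whose first element has index s.
def fgnToks (fmb : Bool) (moves : List String) (s : Int) : List String :=
  (PySem.List.enumerate moves s).map (fun p => fgnToken fmb p.1 p.2)

-- Characters contributed by a list of non-leading tokens: each preceded by one space.
def fgnJ (ts : List String) : List Char :=
  ts.flatMap (fun t => ' ' :: t.toList)

theorem fgnToks_nil (fmb : Bool) (s : Int) : fgnToks fmb [] s = [] := by
  simp [fgnToks, PySem.List.enumerate]

theorem fgnToks_cons (fmb : Bool) (m : String) (rest : List String) (s : Int) :
    fgnToks fmb (m :: rest) s = fgnToken fmb s m :: fgnToks fmb rest (s + 1) := by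
  simp [fgnToks, PySem.List.enumerate_cons]

theorem fgn_join_toList (t : String) (ts : List String) :
    (PySem.Str.join " " (t :: ts)).toList = t.toList ++ fgnJ ts := by
  induction ts generalizing t with
  | nil => simp [PySem.Str.join, PySem.Chars.join_singleton, fgnJ]
  | cons u us ih =>
    have h := PySem.Chars.join_cons_cons " ".toList t.toList
      ((u :: us).map String.toList).head! ((us).map String.toList)
    simp only [PySem.Str.join, List.map_cons] at *
    rw [show (PySem.Chars.join " ".toList (t.toList :: u.toList :: us.map String.toList))
        = t.toList ++ " ".toList ++ PySem.Chars.join " ".toList (u.toList :: us.map String.toList)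
        from PySem.Chars.join_cons_cons _ _ _ _]
    have ih' := ih u
    simp [fgnJ] at ih' ⊢
    rw [show PySem.Chars.join [' '] (u.toList :: us.map String.toList)
        = (String.ofList (PySem.Chars.join [' '] (u.toList :: us.map String.toList))).toList by simp]
    rw [ih']
    simp

-- white-orientation loop invariant: entering A's loop with move_number k+1 while the
-- remaining moves start at index 2k produces exactly B's space-prefixed tokens.
theorem fgnLoop_white (rest : List String) (k : Nat) (acc : String) :
    (fgnLoop rest ((k : Int) + 1) acc).toList
      = acc.toList ++ fgnJ (fgnToks false rest (2 * (k : Int))) := by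
  match rest with
  | [] => simp [fgnLoop, fgnToks_nil, fgnJ]
  | [m] =>
    have hm' : (2 * (k : Int)) % 2 = 0 := by omega
    have hd' : (2 * (k : Int)) / 2 = (k : Int) := by omega
    simp [fgnLoop, fgnToks_cons, fgnToks_nil, fgnToken, hm', hd', fgnJ]
  | m :: m2 :: rest'' =>
    have hm' : (2 * (k : Int)) % 2 = 0 := by omega
    have hd' : (2 * (k : Int)) / 2 = (k : Int) := by omega
    have hm1' : (2 * (k : Int) + 1) % 2 = 1 := by omega
    have ih := fgnLoop_white rest'' (k + 1)
      (acc ++ " " ++ PySem.Int.toStr ((k : Int) + 1) ++ "." ++ " " ++ m ++ " " ++ m2)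
    have hcast : ((k + 1 : Nat) : Int) + 1 = (k : Int) + 1 + 1 := by push_cast; ring
    have hidx : 2 * ((k + 1 : Nat) : Int) = 2 * (k : Int) + 1 + 1 := by push_cast; ring
    rw [hcast, hidx] at ih
    simp only [fgnLoop]
    rw [ih]
    simp [fgnToks_cons, fgnToken, hm', hd', hm1', fgnJ]

-- black-orientation loop invariant: move_number k+2, remaining moves start at index 2k+1.
theorem fgnLoop_black (rest : List String) (k : Nat) (acc : String) :
    (fgnLoop rest ((k : Int) + 2) acc).toList
      = acc.toList ++ fgnJ (fgnToks true rest (2 * (k : Int) + 1)) := by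
  match rest with
  | [] => simp [fgnLoop, fgnToks_nil, fgnJ]
  | [m] =>
    have hm1' : (2 * (k : Int) + 1) % 2 = 1 := by omega
    have hd' : (2 * (k : Int) + 1) / 2 = (k : Int) := by omega
    have hne : 2 * (k : Int) + 1 ≠ 0 := by omega
    simp [fgnLoop, fgnToks_cons, fgnToks_nil, fgnToken, hm1', hd', hne, fgnJ]
  | m :: m2 :: rest'' =>
    have hm1' : (2 * (k : Int) + 1) % 2 = 1 := by omega
    have hd' : (2 * (k : Int) + 1) / 2 = (k : Int) := by omega
    have hne : 2 * (k : Int) + 1 ≠ 0 := by omega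
    have hm0' : (2 * (k : Int) + 1 + 1) % 2 = 0 := by omega
    have hne2 : ¬ (2 * (k : Int) + 1 + 1 = 0) := by omega
    have ih := fgnLoop_black rest'' (k + 1)
      (acc ++ " " ++ PySem.Int.toStr ((k : Int) + 2) ++ "." ++ " " ++ m ++ " " ++ m2)
    have hcast : ((k + 1 : Nat) : Int) + 2 = (k : Int) + 2 + 1 := by push_cast; ring
    have hidx : 2 * ((k + 1 : Nat) : Int) + 1 = 2 * (k : Int) + 1 + 1 + 1 := by push_cast; ring
    rw [hcast, hidx] at ih
    simp only [fgnLoop]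
    rw [ih]
    simp [fgnToks_cons, fgnToken, hm1', hd', hne, hm0', hne2, fgnJ]

-- ===== VERDICT (by name: the statement is the Claim_ definition above) =====
theorem format_game_notation_spec : Claim_equal_format_game_notation := by
  intro moves fmb _
  unfold Spec_format_game_notation
  apply String.toList_injective
  match moves, fmb with
  | [], _ => simp [format_game_notation, format_game_notation_alt, PySem.List.enumerate, PySem.Str.join, PySem.Chars.join_nil]
  | m :: rest, true =>
    show (fgnLoop rest 2 ("1... " ++ m)).toList = _
    have h := fgnLoop_black rest 0 ("1... " ++ m)
    norm_num at h
    rw [h]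
    show _ = (PySem.Str.join " " (fgnToks true (m :: rest) 0)).toList
    rw [fgnToks_cons, fgn_join_toList]
    simp [fgnToken]
  | [m], false =>
    show (fgnLoop [] 2 ("1. " ++ m)).toList = _
    show _ = (PySem.Str.join " " (fgnToks false [m] 0)).toList
    rw [fgnToks_cons, fgn_join_toList, fgnToks_nil]
    simp [fgnLoop, fgnToken, fgnJ, show PySem.Int.mod 0 2 = 0 from rfl,
      show PySem.Int.toChars 1 = ['1'] by decide]
  | m :: m2 :: rest', false =>
    show (fgnLoop rest' 2 ("1. " ++ m ++ " " ++ m2)).toList = _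
    have h := fgnLoop_white rest' 1 ("1. " ++ m ++ " " ++ m2)
    norm_num at h
    rw [h]
    show _ = (PySem.Str.join " " (fgnToks false (m :: m2 :: rest') 0)).toList
    rw [fgnToks_cons, fgnToks_cons, fgn_join_toList]
    simp [fgnToken, fgnJ, show PySem.Int.mod 0 2 = 0 from rfl,
      show PySem.Int.toChars 1 = ['1'] by decide]
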